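-- pv_equiv track=rewrite | github.com/ajr666/LC | oa合集/CodeSignal General Framework/拆建障碍物or房子/1建2查obstacles.py | build_and_check
-- ===== SOURCE A (Python) =====
-- def build_and_check(operations):
--     obstacles = set()  # 用来存储障碍物的位置
--     result = []
--
--     for operation in operations:
--         if operation[0] == 1:
--             # 操作类型 1: 在位置 x 添加障碍物
--             x = operation[1]
--             obstacles.add(x)
--
--         elif operation[0] == 2:
--             # 操作类型 2: 检查是否可以放置大小为 size 的区块从位置 x 开始
--             x, size = operation[1], operation[2]
--             can_place = True
--
--             # 检查从 x 到 x + size - 1 的位置是否有障碍物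
--             for i in range(x, x + size):
--                 if i in obstacles:
--                     can_place = False
--                     break
--
--             # 根据检查结果添加 '1' 或 '0' 到结果中
--             if can_place:
--                 result.append('1')
--             else:
--                 result.append('0')
--
--     # 将结果列表转换为字符串并返回
--     return ''.join(result)
-- ===== SOURCE B (Python) =====
-- def _bisect_left(a, x):
--     # hand-written bisect_left (A imports nothing, so no bisect module)
--     lo, hi = 0, len(a)
--     while lo < hi:
--         mid = (lo + hi) // 2
--         if a[mid] < x:
--             lo = mid + 1
--         else:
--             hi = mid
--     return lo
--
--
-- def build_and_check(operations):
--     obs = []      # sorted list of distinct obstacle positions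
--     result = []
--     for op in operations:
--         if op[0] == 1:
--             x = op[1]
--             j = _bisect_left(obs, x)
--             if j == len(obs) or obs[j] != x:
--                 obs.insert(j, x)
--         elif op[0] == 2:
--             x, size = op[1], op[2]
--             j = _bisect_left(obs, x)
--             result.append('1' if j == len(obs) or obs[j] >= x + size else '0')
--     return ''.join(result)
-- ===== Notes on version B (the rewrite author's own statement) =====
-- stated objective: alternative
-- what changed: Instead of testing every cell in [x, x+size) against a hash set per query, B maintains a sorted list of distinct obstacles and binary-searches for the smallest obstacle >= x; queries no longer depend on size, but insertions pay O(n) list shifting, so overall it is a different algorithm of similar measured cost.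
import Mathlib
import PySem

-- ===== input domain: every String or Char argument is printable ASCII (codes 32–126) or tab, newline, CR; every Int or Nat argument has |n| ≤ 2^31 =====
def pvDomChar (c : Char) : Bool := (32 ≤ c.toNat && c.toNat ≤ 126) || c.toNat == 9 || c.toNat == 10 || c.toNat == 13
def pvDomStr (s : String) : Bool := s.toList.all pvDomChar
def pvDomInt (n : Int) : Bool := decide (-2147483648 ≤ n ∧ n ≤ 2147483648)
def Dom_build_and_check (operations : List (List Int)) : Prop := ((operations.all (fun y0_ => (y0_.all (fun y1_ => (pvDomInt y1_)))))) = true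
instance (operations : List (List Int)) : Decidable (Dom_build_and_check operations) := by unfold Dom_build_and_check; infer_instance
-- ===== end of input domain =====

-- B replaces A's per-query scan of every cell in [x, x+size) with a sorted obstacle list
-- and a binary search for the smallest obstacle ≥ x (objective: alternative algorithm, similar measured cost).


-- ===== PORT A =====
-- the inner 'for i in range(x, x+size): if i in obstacles: can_place = False; break'
def pvScanA (obstacles : PySem.Set Int) : List Int → Bool
  | [] => true
  | i :: rest => if PySem.Set.contains obstacles i then false else pvScanA obstacles rest

def pvStepA (st : PySem.Set Int × List String) (op : List Int) : PySem.Set Int × List String :=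
  if PySem.List.pyGetD op 0 0 = 1 then
    (PySem.Set.add st.1 (PySem.List.pyGetD op 1 0), st.2)
  else if PySem.List.pyGetD op 0 0 = 2 then
    let x := PySem.List.pyGetD op 1 0
    let size := PySem.List.pyGetD op 2 0
    if pvScanA st.1 (PySem.List.pyRange x (x + size) 1) then (st.1, st.2 ++ ["1"])
    else (st.1, st.2 ++ ["0"])
  else st

def build_and_check (operations : List (List Int)) : String :=
  PySem.Str.join "" ((operations.foldl pvStepA (PySem.Set.empty, [])).2)

-- ===== PORT B =====
-- Source B's hand-written _bisect_left is exactly bisect.bisect_left, ported as the prelude's PySem.List.bisectLeft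
def pvInsB (obs : List Int) (x : Int) : List Int :=
  let j := PySem.List.bisectLeft obs x
  if j = obs.length ∨ obs.getD j 0 ≠ x then obs.insertIdx j x else obs

def pvQryB (obs : List Int) (x size : Int) : String :=
  let j := PySem.List.bisectLeft obs x
  if j = obs.length ∨ x + size ≤ obs.getD j 0 then "1" else "0"

def pvStepB (st : List Int × List String) (op : List Int) : List Int × List String :=
  match op with
  | 1 :: x :: _ => (pvInsB st.1 x, st.2)
  | 2 :: x :: size :: _ => (st.1, st.2 ++ [pvQryB st.1 x size])
  | _ => st

def build_and_check_alt (operations : List (List Int)) : String :=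
  PySem.Str.join "" ((operations.foldl pvStepB ([], [])).2)

-- ===== PRECONDITION & SPEC =====
-- Pre_ excludes exactly the operations on which Python A raises IndexError:
-- an empty operation, a type-1 operation shorter than 2, a type-2 operation shorter than 3.
def Pre_build_and_check (operations : List (List Int)) : Prop :=
  ∀ op ∈ operations, op ≠ [] ∧ (op.headI = 1 → 2 ≤ op.length) ∧ (op.headI = 2 → 3 ≤ op.length)
instance (operations : List (List Int)) : Decidable (Pre_build_and_check operations) := by
  unfold Pre_build_and_check; infer_instance

def pvWitness_build_and_check : List (List Int) := [[1, 3], [2, 2, 3], [2, 4, 1], [1, 3], [2, 4, 2]]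

def Spec_build_and_check (operations : List (List Int)) (out : String) : Prop := out = build_and_check_alt operations
instance (operations : List (List Int)) (out : String) : Decidable (Spec_build_and_check operations out) := by unfold Spec_build_and_check; infer_instance

-- ===== CLAIM (what is proved, stated in full; the proofs are below) =====
def Claim_equal_build_and_check : Prop := ∀ (operations : List (List Int)), Dom_build_and_check operations → Pre_build_and_check operations → Spec_build_and_check operations (build_and_check operations)

-- ===== LEMMAS AND PROOFS =====

-- A's inner scan returns true iff no cell of the list is an obstacle
lemma pvScanA_true_iff (s : PySem.Set Int) (l : List Int) :
    pvScanA s l = true ↔ ∀ i ∈ l, ¬ i ∈ s := by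
  induction l with
  | nil => simp [pvScanA]
  | cons a t ih =>
    by_cases h : a ∈ s
    · simp [pvScanA, h]
    · have hc : PySem.Set.contains s a = false := by
        cases hx : PySem.Set.contains s a
        · rfl
        · exact absurd ((PySem.Set.contains_iff s a).1 hx) h
      simp [pvScanA, ih, h]

lemma sorted_getElem_le {obs : List Int} (hs : obs.Pairwise (· < ·))
    {k m : Nat} (hk : k < obs.length) (hm : m < obs.length) (hkm : k ≤ m) :
    obs[k] ≤ obs[m] := by
  rcases Nat.lt_or_ge k m with h | h
  · exact le_of_lt (List.pairwise_iff_getElem.1 hs k m hk hm h)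
  · have : k = m := le_antisymm hkm h
    subst this; exact le_refl _

-- B's query condition holds iff no obstacle lies in [x, x+size)
lemma pvQry_iff (obs : List Int) (x size : Int) (hs : obs.Pairwise (· < ·)) :
    (PySem.List.bisectLeft obs x = obs.length ∨ x + size ≤ obs.getD (PySem.List.bisectLeft obs x) 0)
      ↔ ∀ i ∈ obs, ¬ (x ≤ i ∧ i < x + size) := by
  obtain ⟨hjle, hlt, hge⟩ := PySem.List.bisectLeft_spec obs x (hs.imp le_of_lt)
  set j := PySem.List.bisectLeft obs x with hj
  constructor
  · rintro hcond i hi ⟨hxi, hilt⟩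
    obtain ⟨k, hk, rfl⟩ := List.mem_iff_getElem.1 hi
    rcases Nat.lt_or_ge k j with hkj | hjk
    · exact absurd hxi (not_le.2 (hlt k hk hkj))
    · have hjlen : j < obs.length := lt_of_le_of_lt hjk hk
      rcases hcond with h | h
      · omega
      · rw [List.getD_eq_getElem _ _ hjlen] at h
        have := sorted_getElem_le hs hjlen hk hjk
        omega
  · intro hall
    by_cases hlen : j = obs.length
    · exact Or.inl hlen
    · have hjlen : j < obs.length := lt_of_le_of_ne hjle hlen
      refine Or.inr ?_
      rw [List.getD_eq_getElem _ _ hjlen]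
      have hmem := List.getElem_mem hjlen
      have hxj := hge j hjlen (le_refl j)
      have := hall obs[j] hmem
      omega

lemma insertIdx_eq_take_cons_drop (l : List Int) (j : Nat) (x : Int) (h : j ≤ l.length) :
    l.insertIdx j x = l.take j ++ x :: l.drop j := by
  induction l generalizing j with
  | nil => simp at h; simp [h]
  | cons a t ih =>
    cases j with
    | zero => simp
    | succ k => simp [List.insertIdx_succ_cons, ih k (by simpa using h)]

-- B's insertion keeps the list strictly sorted
lemma pvInsB_sorted (obs : List Int) (x : Int) (hs : obs.Pairwise (· < ·)) :
    (pvInsB obs x).Pairwise (· < ·) := by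
  obtain ⟨hjle, hlt, hge⟩ := PySem.List.bisectLeft_spec obs x (hs.imp le_of_lt)
  set j := PySem.List.bisectLeft obs x with hj
  by_cases hcond : j = obs.length ∨ obs.getD j 0 ≠ x
  · have : pvInsB obs x = obs.insertIdx j x := by
      simp only [pvInsB]; rw [← hj, if_pos hcond]
    rw [this, insertIdx_eq_take_cons_drop obs j x hjle]
    have htake : ∀ a ∈ obs.take j, a < x := by
      intro a ha
      obtain ⟨k, hk, rfl⟩ := List.mem_iff_getElem.1 ha
      have hk' : k < j := by simp at hk; omega
      rw [List.getElem_take]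
      exact hlt k (by simp at hk; omega) hk'
    have hdrop : ∀ b ∈ obs.drop j, x < b := by
      intro b hb
      obtain ⟨k, hk, rfl⟩ := List.mem_iff_getElem.1 hb
      rw [List.getElem_drop]
      have hk' : j + k < obs.length := by simp at hk; omega
      have hxle : x ≤ obs[j + k] := hge (j + k) hk' (Nat.le_add_right _ _)
      have hne : obs[j + k] ≠ x := by
        intro heq
        have hjlen : j < obs.length := by omega
        rcases hcond with hc | hc
        · omega
        · rw [List.getD_eq_getElem _ _ hjlen] at hc
          have h1 : obs[j] ≤ obs[j + k] := sorted_getElem_le hs hjlen hk' (Nat.le_add_right _ _)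
          have h2 : x ≤ obs[j] := hge j hjlen (le_refl j)
          omega
      omega
    rw [List.pairwise_append]
    refine ⟨hs.sublist (List.take_sublist _ _), ?_, ?_⟩
    · rw [List.pairwise_cons]
      exact ⟨hdrop, hs.sublist (List.drop_sublist _ _)⟩
    · intro a ha b hb
      rcases List.mem_cons.1 hb with rfl | hb'
      · exact htake a ha
      · exact lt_trans (htake a ha) (hdrop b hb')
  · have : pvInsB obs x = obs := by
      simp only [pvInsB]; rw [← hj, if_neg hcond]
    rw [this]; exact hs

-- B's insertion has the same members as A's set-add
lemma pvInsB_mem (obs : List Int) (x : Int) (hs : obs.Pairwise (· < ·)) (y : Int) :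
    y ∈ pvInsB obs x ↔ y ∈ obs ∨ y = x := by
  obtain ⟨hjle, hlt, hge⟩ := PySem.List.bisectLeft_spec obs x (hs.imp le_of_lt)
  set j := PySem.List.bisectLeft obs x with hj
  by_cases hcond : j = obs.length ∨ obs.getD j 0 ≠ x
  · have : pvInsB obs x = obs.insertIdx j x := by
      simp only [pvInsB]; rw [← hj, if_pos hcond]
    rw [this, List.mem_insertIdx hjle]; tauto
  · have heq' : pvInsB obs x = obs := by
      simp only [pvInsB]; rw [← hj, if_neg hcond]
    rw [heq']
    push Not at hcond
    obtain ⟨hne, heq⟩ := hcond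
    have hjlen : j < obs.length := lt_of_le_of_ne hjle hne
    rw [List.getD_eq_getElem _ _ hjlen] at heq
    constructor
    · exact Or.inl
    · rintro (h | rfl)
      · exact h
      · exact heq ▸ List.getElem_mem hjlen

-- the main loop invariant: same emitted answers, set and sorted list have the same members
lemma pvLoop_eq (ops : List (List Int)) :
    ∀ (s : PySem.Set Int) (obs : List Int) (res : List String),
    obs.Pairwise (· < ·) → (∀ y, y ∈ s ↔ y ∈ obs) →
    (∀ op ∈ ops, op ≠ [] ∧ (op.headI = 1 → 2 ≤ op.length) ∧ (op.headI = 2 → 3 ≤ op.length)) →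
    (ops.foldl pvStepA (s, res)).2 = (ops.foldl pvStepB (obs, res)).2 := by
  induction ops with
  | nil => intro s obs res _ _ _; rfl
  | cons op ops ih =>
    intro s obs res hsort hmem hpre
    obtain ⟨hne, h1, h2⟩ := hpre op (List.mem_cons_self ..)
    have hpre' := fun o ho => hpre o (List.mem_cons_of_mem _ ho)
    obtain ⟨h0, t, rfl⟩ : ∃ h0 t, op = h0 :: t := by
      cases op with
      | nil => exact absurd rfl hne
      | cons a b => exact ⟨a, b, rfl⟩
    by_cases hh1 : h0 = 1
    · subst hh1
      obtain ⟨x, t', rfl⟩ : ∃ x t', t = x :: t' := by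
        cases t with
        | nil => simp [List.headI] at h1
        | cons a b => exact ⟨a, b, rfl⟩
      simp only [List.foldl_cons]
      have hA : pvStepA (s, res) (1 :: x :: t') = (PySem.Set.add s x, res) := by
        simp [pvStepA, PySem.List.pyGetD_ofNat']
      have hB : pvStepB (obs, res) (1 :: x :: t') = (pvInsB obs x, res) := rfl
      rw [hA, hB]
      exact ih _ _ _ (pvInsB_sorted obs x hsort)
        (fun y => by rw [PySem.Set.mem_add, pvInsB_mem obs x hsort, hmem]) hpre'
    · by_cases hh2 : h0 = 2
      · subst hh2
        obtain ⟨x, size, t', rfl⟩ : ∃ x size t', t = x :: size :: t' := by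
          cases t with
          | nil => simp [List.headI] at h2
          | cons a b =>
            cases b with
            | nil => simp [List.headI] at h2
            | cons c d => exact ⟨a, c, d, rfl⟩
        simp only [List.foldl_cons]
        have hB : pvStepB (obs, res) (2 :: x :: size :: t')
            = (obs, res ++ [pvQryB obs x size]) := rfl
        have hiff : pvScanA s (PySem.List.pyRange x (x + size) 1) = true ↔
            (PySem.List.bisectLeft obs x = obs.length ∨
              x + size ≤ obs.getD (PySem.List.bisectLeft obs x) 0) := by
          rw [pvScanA_true_iff, pvQry_iff obs x size hsort]
          constructor
          · intro h i hi hrange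
            exact h i (by rw [PySem.List.mem_pyRange_one]; exact hrange) ((hmem i).2 hi)
          · intro h i hi his
            exact h i ((hmem i).1 his) (by rwa [PySem.List.mem_pyRange_one] at hi)
        by_cases hq : (PySem.List.bisectLeft obs x = obs.length ∨
            x + size ≤ obs.getD (PySem.List.bisectLeft obs x) 0)
        · have hsc : pvScanA s (PySem.List.pyRange x (x + size) 1) = true := hiff.2 hq
          have hA : pvStepA (s, res) (2 :: x :: size :: t') = (s, res ++ ["1"]) := by
            simp [pvStepA, PySem.List.pyGetD_ofNat', hsc]
          have hQ : pvQryB obs x size = "1" := by simp only [pvQryB]; rw [if_pos hq]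
          rw [hA, hB, hQ]
          exact ih _ _ _ hsort hmem hpre'
        · have hsc : pvScanA s (PySem.List.pyRange x (x + size) 1) = false := by
            cases hx : pvScanA s (PySem.List.pyRange x (x + size) 1)
            · rfl
            · exact absurd (hiff.1 hx) hq
          have hA : pvStepA (s, res) (2 :: x :: size :: t') = (s, res ++ ["0"]) := by
            simp [pvStepA, PySem.List.pyGetD_ofNat', hsc]
          have hQ : pvQryB obs x size = "0" := by simp only [pvQryB]; rw [if_neg hq]
          rw [hA, hB, hQ]
          exact ih _ _ _ hsort hmem hpre'
      · have hA : pvStepA (s, res) (h0 :: t) = (s, res) := by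
          simp [pvStepA, PySem.List.pyGetD_ofNat', hh1, hh2]
        have hB : pvStepB (obs, res) (h0 :: t) = (obs, res) := by
          cases t with
          | nil => cases h0 with
            | ofNat n => match n with
              | 0 => rfl
              | 1 => exact absurd rfl hh1
              | 2 => exact absurd rfl hh2
              | (n+3) => rfl
            | negSucc n => rfl
          | cons a b => cases h0 with
            | ofNat n => match n with
              | 0 => rfl
              | 1 => exact absurd rfl hh1
              | 2 => cases b with
                | nil => rfl
                | cons c d => exact absurd rfl hh2
              | (n+3) => rfl
            | negSucc n => rfl
        simp only [List.foldl_cons]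
        rw [hA, hB]
        exact ih _ _ _ hsort hmem hpre'

-- ===== VERDICT (by name: the statement is the Claim_ definition above) =====
theorem build_and_check_spec : Claim_equal_build_and_check := by
  intro operations _ hpre
  unfold Spec_build_and_check build_and_check build_and_check_alt
  rw [pvLoop_eq operations PySem.Set.empty [] [] List.Pairwise.nil (fun y => by simp [PySem.Set.empty]) hpre]
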